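-- pv_equiv track=rewrite | github.com/ldblckrs-258/vixtts-demo | normalize_vi.py | _separate_alphanumeric
-- ===== SOURCE A (Python) =====
-- def _separate_alphanumeric(text):
--     """
--     Separate mixed alphanumeric strings by inserting spaces between different character types.
--     Example: 22T583XYZ -> 22 T 583 XYZ
--     """
--     result = []
--     current_type = None  # None, 'alpha', or 'digit'
--
--     for char in text:
--         if char.isalpha():
--             new_type = 'alpha'
--         elif char.isdigit():
--             new_type = 'digit'
--         else:
--             new_type = None
--
--         # If type changed, add space (except for initial character)
--         if current_type is not None and new_type != current_type and new_type is not None: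
--             result.append(' ')
--
--         result.append(char)
--         current_type = new_type
--
--     return ''.join(result)
-- ===== SOURCE B (Python) =====
-- def _separate_alphanumeric(text):
--     """
--     Separate mixed alphanumeric strings by inserting spaces between different character types.
--     Example: 22T583XYZ -> 22 T 583 XYZ
--     """
--     def kind(c):
--         return 'alpha' if c.isalpha() else 'digit' if c.isdigit() else None
--
--     # Pass 1: split the text into maximal runs of a single character type.
--     runs = []
--     i, n = 0, len(text)
--     while i < n:
--         k = kind(text[i])
--         j = i + 1
--         while j < n and kind(text[j]) == k:
--             j += 1
--         runs.append((k, text[i:j]))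
--         i = j
--
--     # Pass 2: join the runs, separating two adjacent typed runs with a space.
--     parts = []
--     prev = None
--     for k, s in runs:
--         if prev is not None and k is not None:
--             parts.append(' ')
--         parts.append(s)
--         prev = k
--     return ''.join(parts)
-- ===== Notes on version B (the rewrite author's own statement) =====
-- stated objective: alternative
-- what changed: Replaces A's single stateful per-character loop by run-length grouping: a first pass splits the text into maximal runs of one character type, a second pass joins the runs inserting a space between two adjacent non-None-typed runs.
import Mathlib
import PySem

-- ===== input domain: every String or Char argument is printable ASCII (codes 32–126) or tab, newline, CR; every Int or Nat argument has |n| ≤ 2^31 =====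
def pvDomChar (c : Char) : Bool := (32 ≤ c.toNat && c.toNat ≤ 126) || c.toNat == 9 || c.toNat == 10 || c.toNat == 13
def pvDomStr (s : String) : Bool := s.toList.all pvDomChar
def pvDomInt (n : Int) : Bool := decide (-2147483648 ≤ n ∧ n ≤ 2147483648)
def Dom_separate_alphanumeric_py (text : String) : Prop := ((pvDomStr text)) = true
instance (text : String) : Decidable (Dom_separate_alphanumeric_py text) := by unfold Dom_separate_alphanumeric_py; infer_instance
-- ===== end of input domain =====

-- B replaces A's per-character stateful loop by run-length grouping (split into maximal
-- same-type runs, then join runs with a space between two typed runs); objective: alternative.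

-- ===== PORT A =====
-- character type: none = None, some true = 'alpha', some false = 'digit'
def pvStepA (st : List Char × Option Bool) (ch : Char) : List Char × Option Bool :=
  let newType : Option Bool :=
    if PySem.Chars.isalpha ch then some true
    else if PySem.Chars.isdigit ch then some false
    else none
  let result :=
    if st.2 ≠ none ∧ newType ≠ st.2 ∧ newType ≠ none then st.1 ++ [' '] else st.1
  (result ++ [ch], newType)

def separate_alphanumeric_py (text : String) : String :=
  String.mk (text.toList.foldl pvStepA ([], none)).1

-- ===== PORT B =====
def pvKindB (ch : Char) : Option Bool :=
  if PySem.Chars.isalpha ch then some true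
  else if PySem.Chars.isdigit ch then some false
  else none

-- pass 1 of B: split into maximal runs of one character type (text[i:j] = head ++ takeWhile)
def pvRuns : List Char → List (Option Bool × List Char)
  | [] => []
  | c :: rest =>
    let k := pvKindB c
    (k, c :: rest.takeWhile (fun d => pvKindB d == k)) ::
      pvRuns (rest.dropWhile (fun d => pvKindB d == k))
termination_by cs => cs.length
decreasing_by
  simp only [List.length_cons]
  exact Nat.lt_succ_of_le (List.length_dropWhile_le _ _)

-- pass 2 of B: join the runs, a space between two adjacent typed runs
def pvSepJoin : Option Bool → List (Option Bool × List Char) → List Char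
  | _, [] => []
  | prev, (k, s) :: rest =>
    (if prev.isSome && k.isSome then ' ' :: s else s) ++ pvSepJoin k rest

def separate_alphanumeric_py_alt (text : String) : String :=
  String.mk (pvSepJoin none (pvRuns text.toList))

-- ===== PRECONDITION & SPEC =====
def Spec_separate_alphanumeric_py (text : String) (out : String) : Prop := out = separate_alphanumeric_py_alt text
instance (text : String) (out : String) : Decidable (Spec_separate_alphanumeric_py text out) := by unfold Spec_separate_alphanumeric_py; infer_instance

-- ===== CLAIM =====
def Claim_equal_separate_alphanumeric_py : Prop := ∀ (text : String), Dom_separate_alphanumeric_py text → Spec_separate_alphanumeric_py text (separate_alphanumeric_py text)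

-- ===== LEMMAS AND PROOFS =====

-- what A's loop appends after seeing state t, in closed form
def pvBuild (t : Option Bool) : List Char → List Char
  | [] => []
  | c :: rest =>
    (if t ≠ none ∧ pvKindB c ≠ t ∧ pvKindB c ≠ none then [' ', c] else [c]) ++ pvBuild (pvKindB c) rest

theorem pvFoldA (cs : List Char) : ∀ (acc : List Char) (t : Option Bool),
    (cs.foldl pvStepA (acc, t)).1 = acc ++ pvBuild t cs := by
  induction cs with
  | nil => intro acc t; simp [pvBuild]
  | cons c rest ih =>
    intro acc t
    simp only [List.foldl_cons, pvStepA, pvBuild, pvKindB]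
    split_ifs <;> (rw [ih]; simp)

-- inside one run (all characters of kind k) A appends the characters with no space
theorem pvBuildRun (l : List Char) : ∀ (k : Option Bool) (more : List Char),
    (∀ x ∈ l, pvKindB x = k) → pvBuild k (l ++ more) = l ++ pvBuild k more := by
  induction l with
  | nil => intro k more _; simp
  | cons x xs ih =>
    intro k more h
    have hx : pvKindB x = k := h x (by simp)
    simp only [List.cons_append, pvBuild, hx]
    rw [ih k more (fun y hy => h y (by simp [hy]))]
    simp

-- A's closed form equals B's run join, given that the head's kind differs from t (or t = none)
theorem pvBuildJoin (n : ℕ) : ∀ (cs : List Char) (t : Option Bool), cs.length ≤ n →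
    (t = none ∨ ∀ c, cs.head? = some c → pvKindB c ≠ t) →
    pvBuild t cs = pvSepJoin t (pvRuns cs) := by
  induction n with
  | zero =>
    intro cs t hlen _
    have : cs = [] := List.eq_nil_of_length_eq_zero (Nat.le_zero.mp hlen)
    subst this; simp [pvBuild, pvRuns, pvSepJoin]
  | succ n ih =>
    intro cs t hlen hhead
    match cs with
    | [] => simp [pvBuild, pvRuns, pvSepJoin]
    | c :: rest =>
      have hk : pvKindB c = pvKindB c := rfl
      set k := pvKindB c with hkdef
      have hsplit : rest = rest.takeWhile (fun d => pvKindB d == k) ++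
          rest.dropWhile (fun d => pvKindB d == k) := (List.takeWhile_append_dropWhile).symm
      have htake : ∀ x ∈ rest.takeWhile (fun d => pvKindB d == k), pvKindB x = k := by
        intro x hx
        have := List.mem_takeWhile_imp hx
        simpa using this
      -- head of the dropWhile part (if any) has kind ≠ k
      have hdrop : ∀ c', (rest.dropWhile (fun d => pvKindB d == k)).head? = some c' →
          pvKindB c' ≠ k := by
        intro c' hc'
        have := List.head?_dropWhile_not (fun d => pvKindB d == k) rest
        rw [hc'] at this
        simpa using this
      have hlen' : (rest.dropWhile (fun d => pvKindB d == k)).length ≤ n := by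
        have h1 := List.length_dropWhile_le (fun d => pvKindB d == k) rest
        have h2 : rest.length ≤ n := by simpa using Nat.lt_succ_iff.mp (Nat.lt_of_lt_of_le (Nat.lt_succ_of_le (Nat.le_refl _)) hlen)
        omega
      have hrec : pvBuild k (rest.dropWhile (fun d => pvKindB d == k)) =
          pvSepJoin k (pvRuns (rest.dropWhile (fun d => pvKindB d == k))) := by
        apply ih _ _ hlen'
        right; intro c' hc'; exact hdrop c' hc'
      -- A side
      have hA : pvBuild t (c :: rest) =
          (if t ≠ none ∧ k ≠ t ∧ k ≠ none then [' ', c] else [c]) ++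
            (rest.takeWhile (fun d => pvKindB d == k) ++
              pvBuild k (rest.dropWhile (fun d => pvKindB d == k))) := by
        conv_lhs => rw [show (c :: rest) = c :: rest from rfl]
        simp only [pvBuild, ← hkdef]
        congr 1
        conv_lhs => rw [hsplit]
        exact pvBuildRun _ k _ htake
      -- B side
      have hB : pvSepJoin t (pvRuns (c :: rest)) =
          (if t.isSome && k.isSome then ' ' :: (c :: rest.takeWhile (fun d => pvKindB d == k))
            else c :: rest.takeWhile (fun d => pvKindB d == k)) ++
            pvSepJoin k (pvRuns (rest.dropWhile (fun d => pvKindB d == k))) := by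
        rw [pvRuns]; rfl
      rw [hA, hB, ← hrec]
      -- the two separator conditions agree under the head hypothesis
      have hcond : (if t ≠ none ∧ k ≠ t ∧ k ≠ none then [' ', c] else [c]) ++
            (rest.takeWhile (fun d => pvKindB d == k) ++ pvBuild k (rest.dropWhile (fun d => pvKindB d == k)))
          = (if t.isSome && k.isSome then ' ' :: (c :: rest.takeWhile (fun d => pvKindB d == k))
              else c :: rest.takeWhile (fun d => pvKindB d == k)) ++
            pvBuild k (rest.dropWhile (fun d => pvKindB d == k)) := by
        have hkt : t = none ∨ k ≠ t := by
          rcases hhead with h | h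
          · left; exact h
          · right; exact h c rfl
        rcases ht : t with _ | b <;> rcases hk2 : k with _ | b'
        · simp
        · simp
        · simp
        · have : some b' ≠ some b := by
            rcases hkt with h | h
            · rw [ht] at h; exact absurd h (by simp)
            · rw [ht, hk2] at h; exact h
          simp [this]
      rw [hcond]

-- ===== VERDICT =====
theorem separate_alphanumeric_py_spec : Claim_equal_separate_alphanumeric_py := by
  intro text _
  unfold Spec_separate_alphanumeric_py separate_alphanumeric_py separate_alphanumeric_py_alt
  rw [pvFoldA, List.nil_append,
    pvBuildJoin text.toList.length text.toList none (Nat.le_refl _) (Or.inl rfl)]
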